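-- pv_equiv track=rewrite | github.com/mayfield/CP-Sample-Code | data_flow/_serial_service/monnit/old/CommandGenerator.py | add_step2_crc
-- ===== SOURCE A (Python) =====
-- def add_step2_crc(crc, next_byte):
--     """
--
--     :param crc: the initial CRC, which starts as 0
--     :type crc: int
--     :param next_byte:
--     :type next_byte: int
--     :return: the final CRC as 8-bit byte
--     :rtype: int
--     """
--     crc = (crc ^ next_byte) & 0xFF  # xor with next_byte
--     for j in range(0, 8):
--         if (crc & 0x80) == 0x80:
--             crc = ((crc << 1) & 0xFF) ^ 0x97
--         else:
--             crc <<= 1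
--         crc &= 0xFF
--     return crc
-- ===== SOURCE B (Python) =====
-- # CRC-8 (poly 0x97, MSB-first) step via a precomputed 256-entry lookup table.
-- _CRC8_TABLE = (
--     0x00, 0x97, 0xB9, 0x2E, 0xE5, 0x72, 0x5C, 0xCB, 0x5D, 0xCA, 0xE4, 0x73, 0xB8, 0x2F, 0x01, 0x96,
--     0xBA, 0x2D, 0x03, 0x94, 0x5F, 0xC8, 0xE6, 0x71, 0xE7, 0x70, 0x5E, 0xC9, 0x02, 0x95, 0xBB, 0x2C,
--     0xE3, 0x74, 0x5A, 0xCD, 0x06, 0x91, 0xBF, 0x28, 0xBE, 0x29, 0x07, 0x90, 0x5B, 0xCC, 0xE2, 0x75,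
--     0x59, 0xCE, 0xE0, 0x77, 0xBC, 0x2B, 0x05, 0x92, 0x04, 0x93, 0xBD, 0x2A, 0xE1, 0x76, 0x58, 0xCF,
--     0x51, 0xC6, 0xE8, 0x7F, 0xB4, 0x23, 0x0D, 0x9A, 0x0C, 0x9B, 0xB5, 0x22, 0xE9, 0x7E, 0x50, 0xC7,
--     0xEB, 0x7C, 0x52, 0xC5, 0x0E, 0x99, 0xB7, 0x20, 0xB6, 0x21, 0x0F, 0x98, 0x53, 0xC4, 0xEA, 0x7D,
--     0xB2, 0x25, 0x0B, 0x9C, 0x57, 0xC0, 0xEE, 0x79, 0xEF, 0x78, 0x56, 0xC1, 0x0A, 0x9D, 0xB3, 0x24,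
--     0x08, 0x9F, 0xB1, 0x26, 0xED, 0x7A, 0x54, 0xC3, 0x55, 0xC2, 0xEC, 0x7B, 0xB0, 0x27, 0x09, 0x9E,
--     0xA2, 0x35, 0x1B, 0x8C, 0x47, 0xD0, 0xFE, 0x69, 0xFF, 0x68, 0x46, 0xD1, 0x1A, 0x8D, 0xA3, 0x34,
--     0x18, 0x8F, 0xA1, 0x36, 0xFD, 0x6A, 0x44, 0xD3, 0x45, 0xD2, 0xFC, 0x6B, 0xA0, 0x37, 0x19, 0x8E,
--     0x41, 0xD6, 0xF8, 0x6F, 0xA4, 0x33, 0x1D, 0x8A, 0x1C, 0x8B, 0xA5, 0x32, 0xF9, 0x6E, 0x40, 0xD7,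
--     0xFB, 0x6C, 0x42, 0xD5, 0x1E, 0x89, 0xA7, 0x30, 0xA6, 0x31, 0x1F, 0x88, 0x43, 0xD4, 0xFA, 0x6D,
--     0xF3, 0x64, 0x4A, 0xDD, 0x16, 0x81, 0xAF, 0x38, 0xAE, 0x39, 0x17, 0x80, 0x4B, 0xDC, 0xF2, 0x65,
--     0x49, 0xDE, 0xF0, 0x67, 0xAC, 0x3B, 0x15, 0x82, 0x14, 0x83, 0xAD, 0x3A, 0xF1, 0x66, 0x48, 0xDF,
--     0x10, 0x87, 0xA9, 0x3E, 0xF5, 0x62, 0x4C, 0xDB, 0x4D, 0xDA, 0xF4, 0x63, 0xA8, 0x3F, 0x11, 0x86,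
--     0xAA, 0x3D, 0x13, 0x84, 0x4F, 0xD8, 0xF6, 0x61, 0xF7, 0x60, 0x4E, 0xD9, 0x12, 0x85, 0xAB, 0x3C,
-- )
--
--
-- def add_step2_crc(crc, next_byte):
--     return _CRC8_TABLE[(crc ^ next_byte) & 0xFF]
-- ===== Notes on version B (the rewrite author's own statement) =====
-- stated objective: idiomatic
-- what changed: The 8-iteration shift/xor bit loop is replaced by a single lookup into a hardcoded 256-entry CRC-8 table (poly 0x97, MSB-first).
import Mathlib
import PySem

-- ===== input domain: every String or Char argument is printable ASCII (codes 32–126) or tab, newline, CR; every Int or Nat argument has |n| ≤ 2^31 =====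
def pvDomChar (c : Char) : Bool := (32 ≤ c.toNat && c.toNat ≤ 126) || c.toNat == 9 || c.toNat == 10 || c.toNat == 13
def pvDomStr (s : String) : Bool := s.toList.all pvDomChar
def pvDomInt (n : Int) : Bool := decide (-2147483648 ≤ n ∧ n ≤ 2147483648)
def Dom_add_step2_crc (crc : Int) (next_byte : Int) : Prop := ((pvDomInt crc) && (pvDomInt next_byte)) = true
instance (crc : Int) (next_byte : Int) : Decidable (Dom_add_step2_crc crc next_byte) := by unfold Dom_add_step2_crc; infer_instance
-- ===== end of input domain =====

-- ===== PORT A =====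
-- B changes: the 8-iteration bit loop is replaced by a precomputed 256-entry CRC-8 lookup table (idiomatic).
-- the 'for j in range(0, 8)' loop of A as a fold over the same state
def crcLoop (c0 : Int) : Int :=
  (List.range 8).foldl (fun c _ =>
    let c1 := if PySem.Int.band c 0x80 == 0x80
              then PySem.Int.bxor (PySem.Int.band (c <<< 1) 0xFF) 0x97
              else c <<< 1
    PySem.Int.band c1 0xFF) c0

def add_step2_crc (crc : Int) (next_byte : Int) : Int :=
  -- crc = (crc ^ next_byte) & 0xFF, then 8 shift/xor rounds (poly 0x97, MSB-first)
  crcLoop (PySem.Int.band (PySem.Int.bxor crc next_byte) 0xFF)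

-- ===== PORT B =====
-- _CRC8_TABLE from Source B, literal constants
def crc8Table : List Int := [
  0, 151, 185, 46, 229, 114, 92, 203, 93, 202, 228, 115, 184, 47, 1, 150,
  186, 45, 3, 148, 95, 200, 230, 113, 231, 112, 94, 201, 2, 149, 187, 44,
  227, 116, 90, 205, 6, 145, 191, 40, 190, 41, 7, 144, 91, 204, 226, 117,
  89, 206, 224, 119, 188, 43, 5, 146, 4, 147, 189, 42, 225, 118, 88, 207,
  81, 198, 232, 127, 180, 35, 13, 154, 12, 155, 181, 34, 233, 126, 80, 199,
  235, 124, 82, 197, 14, 153, 183, 32, 182, 33, 15, 152, 83, 196, 234, 125,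
  178, 37, 11, 156, 87, 192, 238, 121, 239, 120, 86, 193, 10, 157, 179, 36,
  8, 159, 177, 38, 237, 122, 84, 195, 85, 194, 236, 123, 176, 39, 9, 158,
  162, 53, 27, 140, 71, 208, 254, 105, 255, 104, 70, 209, 26, 141, 163, 52,
  24, 143, 161, 54, 253, 106, 68, 211, 69, 210, 252, 107, 160, 55, 25, 142,
  65, 214, 248, 111, 164, 51, 29, 138, 28, 139, 165, 50, 249, 110, 64, 215,
  251, 108, 66, 213, 30, 137, 167, 48, 166, 49, 31, 136, 67, 212, 250, 109,
  243, 100, 74, 221, 22, 129, 175, 56, 174, 57, 23, 128, 75, 220, 242, 101,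
  73, 222, 240, 103, 172, 59, 21, 130, 20, 131, 173, 58, 241, 102, 72, 223,
  16, 135, 169, 62, 245, 98, 76, 219, 77, 218, 244, 99, 168, 63, 17, 134,
  170, 61, 19, 132, 79, 216, 246, 97, 247, 96, 78, 217, 18, 133, 171, 60
]

def add_step2_crc_alt (crc : Int) (next_byte : Int) : Int :=
  -- _CRC8_TABLE[(crc ^ next_byte) & 0xFF]; the index is in [0,255] so plain getD is Python-exact here
  crc8Table.getD (PySem.Int.band (PySem.Int.bxor crc next_byte) 0xFF).toNat 0

-- ===== PRECONDITION & SPEC =====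
def Spec_add_step2_crc (crc : Int) (next_byte : Int) (out : Int) : Prop := out = add_step2_crc_alt crc next_byte
instance (crc : Int) (next_byte : Int) (out : Int) : Decidable (Spec_add_step2_crc crc next_byte out) := by unfold Spec_add_step2_crc; infer_instance

-- ===== CLAIM (what is proved, stated in full; the proofs are below) =====
def Claim_equal_add_step2_crc : Prop := ∀ (crc : Int) (next_byte : Int), Dom_add_step2_crc crc next_byte → Spec_add_step2_crc crc next_byte (add_step2_crc crc next_byte)

-- ===== LEMMAS AND PROOFS =====

-- masking with 0xFF always lands in [0, 256)
theorem band255_nonneg (x : Int) : 0 ≤ PySem.Int.band x 255 :=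
  PySem.Int.band_comm x 255 ▸ PySem.Int.band_nonneg_of_nonneg_left x (by norm_num)

theorem band255_lt (x : Int) : PySem.Int.band x 255 < 256 := by
  unfold PySem.Int.band
  split_ifs with h1 h2 h2
  · have h : x.toNat &&& (255:Int).toNat ≤ (255:Int).toNat := Nat.and_le_right
    push_cast at h ⊢
    omega
  · omega
  · have h : (255:Int).toNat &&& (-x - 1).toNat ≤ (255:Int).toNat := Nat.and_le_left
    push_cast at h ⊢
    omega
  · omega

-- the hardcoded table agrees with the 8-round bit loop on every byte value
set_option maxRecDepth 20000 in
theorem table_correct : ∀ n : Fin 256, crcLoop (n : Int) = crc8Table.getD n.val 0 := by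
  decide

-- ===== VERDICT (by name: the statement is the Claim_ definition above) =====
theorem add_step2_crc_spec : Claim_equal_add_step2_crc := by
  intro crc next_byte _
  unfold Spec_add_step2_crc add_step2_crc add_step2_crc_alt
  have h0 := band255_nonneg (PySem.Int.bxor crc next_byte)
  have h1 := band255_lt (PySem.Int.bxor crc next_byte)
  have hb : PySem.Int.band (PySem.Int.bxor crc next_byte) 0xFF
      = (((PySem.Int.band (PySem.Int.bxor crc next_byte) 0xFF).toNat : Nat) : Int) := by omega
  rw [hb]
  exact table_correct ⟨(PySem.Int.band (PySem.Int.bxor crc next_byte) 0xFF).toNat, by omega⟩
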